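-- pv_equiv track=rewrite | github.com/Dieg0Alejandr0/IDS.012-Spring-2021 | data_extraction.py | dates_list
-- ===== SOURCE A (Python) =====
-- month_days = {
--     1:31,
--     2:28,
--     3:31,
--     4:30,
--     5:31,
--     6:30,
--     7:31,
--     8:31,
--     9:30,
--     10:31,
--     11:30,
--     12:31
-- }
--
-- def to_string(L):
--     """
--     Given a list of the form [day, month, year] we return
--     a string of the form 'day-month-year'.
--
--     Input(s):
--     *(list): List of our date's day, month, and year
--
--     Output(s):
--     *(str): A string of date in the proper format (with leading zeros)
--     """
--
--     first, second, third = str(L[0]).zfill(2), str(L[1]).zfill(2), str(L[2])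
--     return f'{first}-{second}-{third}'
--
-- def dates_list(startdate, enddate):
--     """
--     Given the first and last date we wish to see,
--     we return a list of all the dates in between (inclusive).
--
--     Input(s):
--     *startdate(str): The first date we are interested in.
--
--     *enddate(str): The last date we are interested in.
--
--     Output(s):
--     *output(list): A list of dates that have occurred between
--     startdate and enddate (inclusive).
--     """
--
--     output = [startdate]
--     if startdate == enddate: return output
--
--     current = list(map(int, startdate.split('-')))
--     end = list(map(int, enddate.split('-')))
--     while current != end:
--
--         if current[:2] == [12, 31]:
--             current[:2] = [1, 1]
--             current[2] += 1
--
--         elif current[1] == month_days[current[0]]: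
--             current[0] += 1
--             current[1] = 1
--
--         else: current[1] += 1
--
--         output.append( to_string(current) )
--
--     return output
-- ===== SOURCE B (Python) =====
-- _PREFIX = [0, 31, 59, 90, 120, 151, 181, 212, 243, 273, 304, 334]
--
-- def dates_list(startdate, enddate):
--     output = [startdate]
--     if startdate == enddate:
--         return output
--     sm, sd, sy = map(int, startdate.split('-'))
--     em, ed, ey = map(int, enddate.split('-'))
--     o = 365 * sy + _PREFIX[sm - 1] + (sd - 1)
--     e = 365 * ey + _PREFIX[em - 1] + (ed - 1)
--     while o != e:
--         o += 1
--         y, r = divmod(o, 365)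
--         m = 12
--         while _PREFIX[m - 1] > r:
--             m -= 1
--         d = r - _PREFIX[m - 1] + 1
--         output.append(f'{str(m).zfill(2)}-{str(d).zfill(2)}-{y}')
--     return output
-- ===== Notes on version B (the rewrite author's own statement) =====
-- stated objective: alternative
-- what changed: Replaces A's three-field calendar carry state machine (slice compare, dict lookup, per-field increments) by a single integer day-ordinal counter (365*y + month-prefix-sum + d-1) that is incremented and decoded back to m-d-y with divmod and a prefix-table scan.
-- outside the precondition, e.g. on dates_list('2-29-1', '2-30-1'): A returns ['2-29-1', '02-30-1'], B returns ['2-29-1', '03-02-1']; on dates_list('13-1-2020', '13-2-2020'): A raises KeyError, B raises IndexError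
import Mathlib
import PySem

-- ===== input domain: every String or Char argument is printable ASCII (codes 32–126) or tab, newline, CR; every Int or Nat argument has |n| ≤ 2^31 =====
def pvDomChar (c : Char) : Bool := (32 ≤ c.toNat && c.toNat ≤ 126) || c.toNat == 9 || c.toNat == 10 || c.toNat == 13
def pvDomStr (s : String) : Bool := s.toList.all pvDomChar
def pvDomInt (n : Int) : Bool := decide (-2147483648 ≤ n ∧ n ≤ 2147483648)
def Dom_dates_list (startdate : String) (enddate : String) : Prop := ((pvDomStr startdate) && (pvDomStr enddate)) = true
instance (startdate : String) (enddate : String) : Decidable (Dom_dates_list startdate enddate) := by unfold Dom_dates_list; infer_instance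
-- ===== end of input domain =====

-- B replaces A's three-field calendar carry state machine by a single day-ordinal counter
-- (365*y + month prefix sum + d-1) incremented and decoded back with divmod; objective: alternative.

-- ===== PORT A =====

-- month_days dict
def pvMonthDays : PySem.Dict Int Int :=
  PySem.Dict.ofList [(1,31),(2,28),(3,31),(4,30),(5,31),(6,30),(7,31),(8,31),(9,30),(10,31),(11,30),(12,31)]

-- to_string(L): f'{str(L[0]).zfill(2)}-{str(L[1]).zfill(2)}-{str(L[2])}'
-- (L[i] on a too-short list raises IndexError in Python — excluded by Pre_; default 0 is never read inside Pre_)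
def pvToString (L : List Int) : String :=
  PySem.Str.join "-" [PySem.Str.zfill (PySem.Int.toStr (PySem.List.pyGetD L 0 0)) 2,
                      PySem.Str.zfill (PySem.Int.toStr (PySem.List.pyGetD L 1 0)) 2,
                      PySem.Int.toStr (PySem.List.pyGetD L 2 0)]

-- list(map(int, s.split('-'))); sep "-" ≠ "" so split? is always some;
-- int(t) raises ValueError where ofStr? is none — excluded by Pre_, default 0 never read inside Pre_
def pvParse (s : String) : List Int :=
  ((PySem.Str.split? s "-").getD []).map (fun t => (PySem.Int.ofStr? t).getD 0)

-- one iteration of A's while-body state update (month_days[current[0]] KeyError excluded by Pre_)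
def pvStepA (cur : List Int) : List Int :=
  if PySem.List.slice cur (some 0) (some 2) = [12, 31] then
    -- current[:2] = [1,1]; current[2] += 1
    let c := [1, 1] ++ cur.drop 2
    c.set 2 (PySem.List.pyGetD c 2 0 + 1)
  else if PySem.List.pyGetD cur 1 0 = PySem.Dict.getD pvMonthDays (PySem.List.pyGetD cur 0 0) 0 then
    (cur.set 0 (PySem.List.pyGetD cur 0 0 + 1)).set 1 1
  else
    cur.set 1 (PySem.List.pyGetD cur 1 0 + 1)

-- the while loop; fuel is a totality guard only (inside Pre_ exactly ord(end)-ord(start) iterations run)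
def pvLoopA (fuel : Nat) (cur endl : List Int) (acc : List String) : List String :=
  match fuel with
  | 0 => acc
  | f + 1 =>
    if cur = endl then acc
    else
      let c := pvStepA cur
      pvLoopA f c endl (acc ++ [pvToString c])

-- fuel bound: day ordinal of a parsed [m,d,y] list (totality guard only, not part of A's algorithm)
def pvCum13 : List Int := [0,31,59,90,120,151,181,212,243,273,304,334,365]
def pvOrdL (L : List Int) : Int :=
  365 * PySem.List.pyGetD L 2 0 + PySem.List.pyGetD pvCum13 (PySem.List.pyGetD L 0 0 - 1) 0
    + (PySem.List.pyGetD L 1 0 - 1)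

def dates_list (startdate : String) (enddate : String) : List String :=
  let output := [startdate]
  if startdate = enddate then output
  else
    let current := pvParse startdate
    let endl := pvParse enddate
    pvLoopA ((pvOrdL endl - pvOrdL current).toNat + 1) current endl output

-- ===== PORT B =====

-- _PREFIX
def pvPrefix : List Int := [0, 31, 59, 90, 120, 151, 181, 212, 243, 273, 304, 334]
-- _PREFIX[i] (Python indexing, negative wraparound included; out of range raises — excluded by Pre_)
def pvPrefAt (i : Int) : Int := PySem.List.pyGetD pvPrefix i 0

-- 'm = 12; while _PREFIX[m-1] > r: m -= 1'; m is the Nat fuel counting down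
def pvFindM : Nat → Int → Int
  | 0, _ => 0
  | k + 1, r => if pvPrefAt (((k : Int) + 1) - 1) > r then pvFindM k r else ((k : Int) + 1)

-- f'{str(m).zfill(2)}-{str(d).zfill(2)}-{y}'
def pvFmt (m d y : Int) : String :=
  PySem.Str.join "-" [PySem.Str.zfill (PySem.Int.toStr m) 2, PySem.Str.zfill (PySem.Int.toStr d) 2,
                      PySem.Int.toStr y]

-- 365*y + _PREFIX[m-1] + (d-1)
def pvToOrd (m d y : Int) : Int := 365 * y + pvPrefAt (m - 1) + (d - 1)

-- B's while loop on the ordinal counter; fuel is a totality guard only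
def pvLoopB (fuel : Nat) (o e : Int) (acc : List String) : List String :=
  match fuel with
  | 0 => acc
  | f + 1 =>
    if o = e then acc
    else
      let o' := o + 1
      let y := PySem.Int.floordiv o' 365
      let r := PySem.Int.mod o' 365
      let m := pvFindM 12 r
      let d := r - pvPrefAt (m - 1) + 1
      pvLoopB f o' e (acc ++ [pvFmt m d y])

def dates_list_alt (startdate : String) (enddate : String) : List String :=
  let output := [startdate]
  if startdate = enddate then output
  else
    -- sm, sd, sy = map(int, s.split('-')) — same parse line as A, shared helper pvParse
    let ps := pvParse startdate
    let pe := pvParse enddate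
    let o := pvToOrd (PySem.List.pyGetD ps 0 0) (PySem.List.pyGetD ps 1 0) (PySem.List.pyGetD ps 2 0)
    let e := pvToOrd (PySem.List.pyGetD pe 0 0) (PySem.List.pyGetD pe 1 0) (PySem.List.pyGetD pe 2 0)
    pvLoopB ((e - o).toNat + 1) o e output

-- ===== PRECONDITION & SPEC =====

-- cumulative days before month m (proof/spec-side table; pvCum 13 = 365)
def pvCum (m : Int) : Int :=
  if m ≤ 1 then 0 else if m ≤ 2 then 31 else if m ≤ 3 then 59 else if m ≤ 4 then 90
  else if m ≤ 5 then 120 else if m ≤ 6 then 151 else if m ≤ 7 then 181 else if m ≤ 8 then 212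
  else if m ≤ 9 then 243 else if m ≤ 10 then 273 else if m ≤ 11 then 304 else if m ≤ 12 then 334
  else 365

def pvOrd3 (m d y : Int) : Int := 365 * y + pvCum m + (d - 1)

def pvValidB (m d y : Int) : Bool :=
  decide (1 ≤ m) && decide (m ≤ 12) && decide (1 ≤ d) && decide (pvCum m + d ≤ pvCum (m + 1))
    && decide (0 ≤ y)

def pvParseP (s : String) : Option (Int × Int × Int) :=
  match ((PySem.Str.split? s "-").getD []).map PySem.Int.ofStr? with
  | [some a, some b, some c] => some (a, b, c)
  | _ => none

def pvPreB (s e : String) : Bool :=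
  s == e ||
  (match pvParseP s, pvParseP e with
   | some (m, d, y), some (m', d', y') =>
      pvValidB m d y && pvValidB m' d' y' && decide (pvOrd3 m d y ≤ pvOrd3 m' d' y')
   | _, _ => false)

-- Pre_ excludes inputs on which A raises (ValueError/KeyError/IndexError on malformed dates),
-- loops forever (enddate before startdate, or a day count a valid carry never reaches), and the
-- accidental sequences of nonexistent dates A emits from an invalid start day (e.g. '02-30');
-- equal strings are always admitted.
def Pre_dates_list (startdate : String) (enddate : String) : Prop := pvPreB startdate enddate = true
instance (startdate : String) (enddate : String) : Decidable (Pre_dates_list startdate enddate) := by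
  unfold Pre_dates_list; infer_instance

def pvWitness_dates_list : String × String := ("1-1-2020", "1-3-2020")

def Spec_dates_list (startdate : String) (enddate : String) (out : List String) : Prop :=
  out = dates_list_alt startdate enddate
instance (startdate : String) (enddate : String) (out : List String) :
    Decidable (Spec_dates_list startdate enddate out) := by unfold Spec_dates_list; infer_instance

-- ===== CLAIM (what is proved, stated in full; the proofs are below) =====
def Claim_equal_dates_list : Prop := ∀ (startdate : String) (enddate : String),
  Dom_dates_list startdate enddate → Pre_dates_list startdate enddate →
  Spec_dates_list startdate enddate (dates_list startdate enddate)

-- ===== LEMMAS AND PROOFS =====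

def pvNm (m d : Int) : Int :=
  if m = 12 ∧ d = 31 then 1 else if pvCum m + d = pvCum (m + 1) then m + 1 else m
def pvNd (m d : Int) : Int :=
  if m = 12 ∧ d = 31 then 1 else if pvCum m + d = pvCum (m + 1) then 1 else d + 1
def pvNy (m d y : Int) : Int := if m = 12 ∧ d = 31 then y + 1 else y

theorem pvValidB_iff (m d y : Int) : pvValidB m d y = true ↔
    1 ≤ m ∧ m ≤ 12 ∧ 1 ≤ d ∧ pvCum m + d ≤ pvCum (m + 1) ∧ 0 ≤ y := by
  simp [pvValidB, and_assoc]

theorem pvMonthDays_eq (m : Int) (h1 : 1 ≤ m) (h2 : m ≤ 12) :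
    PySem.Dict.getD pvMonthDays m 0 = pvCum (m + 1) - pvCum m := by
  interval_cases m <;> rfl

theorem pvStepA_eq (m d y : Int) (h1 : 1 ≤ m) (h2 : m ≤ 12) :
    pvStepA [m, d, y] = [pvNm m d, pvNd m d, pvNy m d y] := by
  have hsl : PySem.List.slice [m, d, y] (some 0) (some 2) = [m, d] := rfl
  have hg1 : PySem.List.pyGetD [m, d, y] 1 0 = d := rfl
  have hg0 : PySem.List.pyGetD [m, d, y] 0 0 = m := rfl
  simp only [pvStepA, hsl, hg1, hg0, pvMonthDays_eq m h1 h2]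
  by_cases hD : m = 12 ∧ d = 31
  · obtain ⟨hm, hd⟩ := hD; subst hm; subst hd; rfl
  · have hD' : ¬([m, d] : List Int) = [12, 31] := by
      intro hc; exact hD (by injection hc with a b; injection b with c _; exact ⟨a, c⟩)
    by_cases hE : pvCum m + d = pvCum (m + 1)
    · rw [if_neg hD', if_pos (by omega : d = pvCum (m + 1) - pvCum m)]
      simp only [pvNm, pvNd, pvNy, if_neg hD, if_pos hE]
      rfl
    · rw [if_neg hD', if_neg (by omega : ¬ d = pvCum (m + 1) - pvCum m)]
      simp only [pvNm, pvNd, pvNy, if_neg hD, if_neg hE]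
      rfl

theorem pvNext_valid_ord (m d y : Int) (hv : pvValidB m d y = true) :
    pvValidB (pvNm m d) (pvNd m d) (pvNy m d y) = true ∧
    pvOrd3 (pvNm m d) (pvNd m d) (pvNy m d y) = pvOrd3 m d y + 1 := by
  obtain ⟨h1, h2, h3, h4, h5⟩ := (pvValidB_iff m d y).mp hv
  by_cases hD : m = 12 ∧ d = 31
  · obtain ⟨hm, hd⟩ := hD; subst hm; subst hd
    simp only [pvNm, pvNd, pvNy]
    rw [pvValidB_iff]
    norm_num [pvOrd3, pvCum]
    omega
  · simp only [pvNm, pvNd, pvNy, if_neg hD]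
    by_cases hE : pvCum m + d = pvCum (m + 1)
    · simp only [if_pos hE]
      rw [pvValidB_iff]
      interval_cases m <;> norm_num [pvCum, pvOrd3] at * <;> omega
    · simp only [if_neg hE]
      rw [pvValidB_iff]
      interval_cases m <;> norm_num [pvCum, pvOrd3] at * <;> omega

theorem pvFindM_spec (m r : Int) (h1 : 1 ≤ m) (h2 : m ≤ 12) (h3 : pvCum m ≤ r)
    (h4 : r < pvCum (m + 1)) : pvFindM 12 r = m := by
  interval_cases m <;> norm_num [pvCum] at h3 h4 <;> interval_cases r <;> decide

theorem pvPrefAt_cum (m : Int) (h1 : 1 ≤ m) (h2 : m ≤ 12) : pvPrefAt (m - 1) = pvCum m := by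
  interval_cases m <;> rfl

theorem pvDecode (m d y : Int) (hv : pvValidB m d y = true) :
    PySem.Int.floordiv (pvOrd3 m d y) 365 = y ∧
    PySem.Int.mod (pvOrd3 m d y) 365 = pvCum m + (d - 1) ∧
    pvFindM 12 (pvCum m + (d - 1)) = m ∧
    pvPrefAt (m - 1) = pvCum m := by
  obtain ⟨h1, h2, h3, h4, h5⟩ := (pvValidB_iff m d y).mp hv
  have hq : 0 ≤ pvCum m + (d - 1) ∧ pvCum m + (d - 1) < 365 := by
    interval_cases m <;> norm_num [pvCum] at * <;> omega
  have hfd : PySem.Int.floordiv (pvOrd3 m d y) 365 = y := by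
    rw [PySem.Int.floordiv_eq_iff_of_pos (by norm_num)]
    simp only [pvOrd3]; constructor <;> omega
  have hmod : PySem.Int.mod (pvOrd3 m d y) 365 = pvCum m + (d - 1) := by
    have := PySem.Int.floordiv_mul_add_mod (pvOrd3 m d y) 365
    rw [hfd] at this
    simp only [pvOrd3] at this ⊢
    omega
  exact ⟨hfd, hmod, pvFindM_spec m _ h1 h2 (by omega) (by interval_cases m <;> norm_num [pvCum] at * <;> omega),
    pvPrefAt_cum m h1 h2⟩

theorem pvOrd3_inj (m d y m' d' y' : Int) (hv : pvValidB m d y = true)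
    (hv' : pvValidB m' d' y' = true) (h : pvOrd3 m d y = pvOrd3 m' d' y') :
    m = m' ∧ d = d' ∧ y = y' := by
  obtain ⟨f1, m1, fm1, -⟩ := pvDecode m d y hv
  obtain ⟨f2, m2, fm2, -⟩ := pvDecode m' d' y' hv'
  rw [h] at f1 m1
  have hy : y = y' := f1.symm.trans f2
  have hm : m = m' := by rw [m2] at m1; rw [← fm1, ← fm2, m1]
  refine ⟨hm, ?_, hy⟩
  rw [m2, hm] at m1
  omega

theorem pvToString_fmt (a b c : Int) : pvToString [a, b, c] = pvFmt a b c := rfl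

theorem pvLoop_eq : ∀ (n fa fb : Nat) (m d y em ed ey : Int) (acc : List String),
    pvValidB m d y = true → pvValidB em ed ey = true →
    pvOrd3 m d y ≤ pvOrd3 em ed ey →
    (pvOrd3 em ed ey - pvOrd3 m d y).toNat = n →
    n < fa → n < fb →
    pvLoopA fa [m, d, y] [em, ed, ey] acc
      = pvLoopB fb (pvOrd3 m d y) (pvOrd3 em ed ey) acc := by
  intro n
  induction n with
  | zero =>
    intro fa fb m d y em ed ey acc hv hv' hle hn hfa hfb
    have heq : pvOrd3 m d y = pvOrd3 em ed ey := by omega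
    obtain ⟨e1, e2, e3⟩ := pvOrd3_inj m d y em ed ey hv hv' heq
    subst e1; subst e2; subst e3
    match fa, hfa with
    | fa' + 1, _ =>
    match fb, hfb with
    | fb' + 1, _ =>
    simp [pvLoopA, pvLoopB]
  | succ n ih =>
    intro fa fb m d y em ed ey acc hv hv' hle hn hfa hfb
    have hlt : pvOrd3 m d y < pvOrd3 em ed ey := by omega
    have hne : ¬([m, d, y] : List Int) = [em, ed, ey] := by
      intro hc
      obtain ⟨a, c, e⟩ : m = em ∧ d = ed ∧ y = ey := by
        injection hc with a b; injection b with c b'; injection b' with e _; exact ⟨a, c, e⟩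
      subst a; subst c; subst e; exact lt_irrefl _ hlt
    obtain ⟨h1, h2, -, -, -⟩ := (pvValidB_iff m d y).mp hv
    obtain ⟨hvN, hordN⟩ := pvNext_valid_ord m d y hv
    obtain ⟨fd, md', fm', pf'⟩ := pvDecode (pvNm m d) (pvNd m d) (pvNy m d y) hvN
    match fa, hfa with
    | fa' + 1, _ =>
    match fb, hfb with
    | fb' + 1, _ =>
    simp only [pvLoopA, pvLoopB, if_neg hne,
      if_neg (by omega : ¬ pvOrd3 m d y = pvOrd3 em ed ey)]
    rw [pvStepA_eq m d y h1 h2, pvToString_fmt]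
    have hB : pvOrd3 m d y + 1 = pvOrd3 (pvNm m d) (pvNd m d) (pvNy m d y) := hordN.symm
    rw [hB, fd, md', fm', pf']
    have hdd : pvCum (pvNm m d) + (pvNd m d - 1) - pvCum (pvNm m d) + 1 = pvNd m d := by ring
    rw [hdd]
    exact ih fa' fb' _ _ _ em ed ey _ hvN hv' (by rw [hordN]; omega) (by rw [hordN]; omega)
      (by omega) (by omega)

theorem pvParseP_eq (s : String) (m d y : Int) (h : pvParseP s = some (m, d, y)) :
    ((PySem.Str.split? s "-").getD []).map (fun t => (PySem.Int.ofStr? t).getD 0) = [m, d, y] := by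
  unfold pvParseP at h
  rcases hL : (PySem.Str.split? s "-").getD [] with _ | ⟨a, _ | ⟨b, _ | ⟨c, rest⟩⟩⟩ <;>
    rw [hL] at h <;> try simp at h
  rcases rest with _ | ⟨e', t⟩
  · rcases oa : PySem.Int.ofStr? a with _ | va <;> rcases ob : PySem.Int.ofStr? b with _ | vb <;>
      rcases oc : PySem.Int.ofStr? c with _ | vc <;> simp [oa, ob, oc] at h <;>
      simp [oa, ob, oc, h.1, h.2.1, h.2.2]
  · simp at h

theorem pvOrdL_eq (m d y : Int) (h1 : 1 ≤ m) (h2 : m ≤ 12) :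
    pvOrdL [m, d, y] = pvOrd3 m d y := by
  have hg : PySem.List.pyGetD pvCum13 (m - 1) 0 = pvCum m := by interval_cases m <;> rfl
  have hu : pvOrdL [m, d, y] = 365 * y + PySem.List.pyGetD pvCum13 (m - 1) 0 + (d - 1) := rfl
  rw [hu, hg]; rfl


-- ===== VERDICT (by name: the statement is the Claim_ definition above) =====
theorem dates_list_spec : Claim_equal_dates_list := by
  unfold Claim_equal_dates_list
  intro s e hDom hPre
  unfold Spec_dates_list
  by_cases hse : s = e
  · subst hse; simp [dates_list, dates_list_alt]
  · unfold Pre_dates_list pvPreB at hPre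
    rw [Bool.or_eq_true] at hPre
    rcases hPre with h | h
    · exact absurd (by simpa using h) hse
    · rcases hs : pvParseP s with _ | ⟨⟨m, d, y⟩⟩ <;> rcases he' : pvParseP e with _ | ⟨⟨em, ed, ey⟩⟩ <;>
        rw [hs, he'] at h <;> try simp at h
      obtain ⟨⟨hv, hv'⟩, hle⟩ := h
      have hps := pvParseP_eq s m d y hs
      have hpe := pvParseP_eq e em ed ey he'
      obtain ⟨a1, a2, -, -, -⟩ := (pvValidB_iff m d y).mp hv
      obtain ⟨b1, b2, -, -, -⟩ := (pvValidB_iff em ed ey).mp hv'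
      have hto : pvToOrd m d y = pvOrd3 m d y := by
        simp only [pvToOrd, pvPrefAt_cum m a1 a2, pvOrd3]
      have hto' : pvToOrd em ed ey = pvOrd3 em ed ey := by
        simp only [pvToOrd, pvPrefAt_cum em b1 b2, pvOrd3]
      simp only [dates_list, dates_list_alt, if_neg hse]
      rw [show pvParse s = [m, d, y] from hps, show pvParse e = [em, ed, ey] from hpe,
                    pvOrdL_eq m d y a1 a2, pvOrdL_eq em ed ey b1 b2]
      show pvLoopA _ [m, d, y] [em, ed, ey] [s]
          = pvLoopB ((pvToOrd em ed ey - pvToOrd m d y).toNat + 1) (pvToOrd m d y)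
              (pvToOrd em ed ey) [s]
      rw [hto, hto']
      exact pvLoop_eq ((pvOrd3 em ed ey - pvOrd3 m d y).toNat) _ _ m d y em ed ey [s] hv hv' hle
        rfl (by omega) (by omega)
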